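-- pv_equiv track=rewrite | github.com/havarpan/neoprechac | src/python/patternStrToAnimationUrl.py | replace_zeros
-- ===== SOURCE A (Python) =====
-- def replace_zeros(strings: list, pattern_length: int):
--     result = ""
--     for i in range(pattern_length):
--         replace_zero = "0"
--         for string in strings:
--             if string[i] != "0":
--                 replace_zero = string[i]
--                 break
--         result += replace_zero
--     return result
-- ===== SOURCE B (Python) =====
-- def replace_zeros(strings: list, pattern_length: int):
--     # String-major transposition: keep a result buffer and the list of still
--     # unfilled columns; one pass over the strings, early exit when all filled.
--     result = ["0"] * pattern_length
--     unfilled = list(range(pattern_length))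
--     for string in strings:
--         if not unfilled:
--             break
--         still = []
--         for i in unfilled:
--             c = string[i]
--             if c != "0":
--                 result[i] = c
--             else:
--                 still.append(i)
--         unfilled = still
--     return "".join(result)
-- ===== Notes on version B (the rewrite author's own statement) =====
-- stated objective: alternative
-- what changed: Transposed the loop nesting from column-major (per column, scan strings for the first non-'0' char) to string-major: one pass over the strings maintaining a result buffer and the list of still-unfilled columns, with an early exit once every column is filled; the string is assembled by join instead of repeated concatenation.
import Mathlib
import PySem

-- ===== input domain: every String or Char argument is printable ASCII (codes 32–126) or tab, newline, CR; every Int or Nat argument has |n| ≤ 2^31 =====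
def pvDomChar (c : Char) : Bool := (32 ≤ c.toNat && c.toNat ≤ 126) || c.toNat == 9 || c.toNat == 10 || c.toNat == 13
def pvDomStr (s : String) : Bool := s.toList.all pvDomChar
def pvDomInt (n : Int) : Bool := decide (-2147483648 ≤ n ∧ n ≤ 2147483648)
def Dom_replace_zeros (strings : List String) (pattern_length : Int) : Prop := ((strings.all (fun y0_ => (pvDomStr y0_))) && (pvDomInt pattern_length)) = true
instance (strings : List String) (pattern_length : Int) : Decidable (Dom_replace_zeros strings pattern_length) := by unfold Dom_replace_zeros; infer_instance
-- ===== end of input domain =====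

-- B transposes A's loops to string-major with a result buffer, an unfilled-column
-- list and an all-filled early exit; same return value (objective: alternative).


-- ===== PORT A =====
-- inner 'for string in strings' loop: replace_zero accumulator with break
def innerA (i : Int) : List String → String
  | [] => "0"
  | s :: rest =>
    match PySem.Str.pyGet? s i with
    | none => "0"                      -- Python raises IndexError here; excluded by Pre_
    | some c => if c ≠ '0' then String.ofList [c] else innerA i rest

def replace_zeros (strings : List String) (pattern_length : Int) : String :=
  (PySem.List.pyRange 0 pattern_length 1).foldl
    (fun result i => result ++ innerA i strings) ""

-- ===== PORT B =====
-- the inner 'for i in unfilled' loop of Source B (state: result buffer, 'still' list)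
def rowStepB (s : List Char) (st : List Char × List Nat) : List Char × List Nat :=
  st.2.foldl
    (fun (p : List Char × List Nat) i =>
      let c := s.getD i '0'            -- string[i]; in range on every input Pre_ admits
      if c ≠ '0' then (p.1.set i c, p.2) else (p.1, p.2 ++ [i]))
    (st.1, [])

-- the outer 'for string in strings' loop with the all-filled early exit
def loopB : List String → List Char × List Nat → List Char
  | [], st => st.1
  | s :: rest, st => if st.2.isEmpty then st.1 else loopB rest (rowStepB s.toList st)

def replace_zeros_alt (strings : List String) (pattern_length : Int) : String :=
  String.ofList (loopB strings
    (List.replicate pattern_length.toNat '0', List.range pattern_length.toNat))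

-- ===== PRECONDITION & SPEC =====
-- Pre_ admits exactly the inputs where Python A returns: in every column i, no
-- string shorter than i+1 is reached before the first non-'0' entry (else IndexError).
def Pre_replace_zeros (strings : List String) (pattern_length : Int) : Prop :=
  ∀ i < min pattern_length.toNat ((strings.getD 0 "").toList.length + 1), ∀ j < strings.length,
    (strings.getD j "").toList.length ≤ i →
      ∃ k < j, (strings.getD k "").toList.getD i '0' ≠ '0'
instance (strings : List String) (pattern_length : Int) : Decidable (Pre_replace_zeros strings pattern_length) := by unfold Pre_replace_zeros; infer_instance

def pvWitness_replace_zeros : List String × Int := (["10", "05"], 2)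

def Spec_replace_zeros (strings : List String) (pattern_length : Int) (out : String) : Prop := out = replace_zeros_alt strings pattern_length
instance (strings : List String) (pattern_length : Int) (out : String) : Decidable (Spec_replace_zeros strings pattern_length out) := by unfold Spec_replace_zeros; infer_instance

-- ===== CLAIM (what is proved, stated in full; the proofs are below) =====
def Claim_equal_replace_zeros : Prop := ∀ (strings : List String) (pattern_length : Int), Dom_replace_zeros strings pattern_length → Pre_replace_zeros strings pattern_length → Spec_replace_zeros strings pattern_length (replace_zeros strings pattern_length)

-- ===== LEMMAS AND PROOFS =====

-- the first non-'0' character of column i (short strings read as '0')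
def colSpec : List String → Nat → Char
  | [], _ => '0'
  | s :: rest, i => if s.toList.getD i '0' ≠ '0' then s.toList.getD i '0' else colSpec rest i

-- column i is safe: scanning in order, a non-'0' entry breaks before any short string
def ColOkP : List String → Nat → Prop
  | [], _ => True
  | s :: rest, i =>
    if s.toList.getD i '0' ≠ '0' then True else i < s.toList.length ∧ ColOkP rest i

theorem pre_colOkP (strings : List String) (i : Nat)
    (h : ∀ j < strings.length, (strings.getD j "").toList.length ≤ i →
      ∃ k < j, (strings.getD k "").toList.getD i '0' ≠ '0') : ColOkP strings i := by
  induction strings with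
  | nil => trivial
  | cons s rest ih =>
    by_cases hc : s.toList.getD i '0' ≠ '0'
    · simp only [ColOkP, if_pos hc]
    · simp only [ColOkP, if_neg hc]
      constructor
      · by_contra hlen
        obtain ⟨k, hk0, _⟩ := h 0 (by simp) (by simpa using Nat.le_of_not_lt hlen)
        omega
      · apply ih
        intro j hj hshort
        obtain ⟨k, hk, hkc⟩ := h (j + 1) (by simpa using hj) (by simpa using hshort)
        match k, hk with
        | 0, _ => exact absurd (by simpa using hkc) hc
        | k' + 1, hk => exact ⟨k', by omega, by simpa using hkc⟩

theorem innerA_spec (strings : List String) (i : Nat) (h : ColOkP strings i) :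
    innerA (i : Int) strings = String.ofList [colSpec strings i] := by
  induction strings with
  | nil => rfl
  | cons s rest ih =>
    by_cases hc : s.toList.getD i '0' ≠ '0'
    · have hlt : i < s.toList.length := by
        by_contra hlen
        exact hc (List.getD_eq_default _ _ (Nat.le_of_not_lt hlen))
      have hsome : PySem.Str.pyGet? s (i : Int) = some (s.toList.getD i '0') := by
        rw [PySem.Str.pyGet?_natCast, List.getD_eq_getElem _ _ hlt]
        exact List.getElem?_eq_getElem hlt
      simp only [innerA, hsome, colSpec, if_pos hc]
    · simp only [ColOkP, if_neg hc] at h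
      obtain ⟨hlt, hrest⟩ := h
      have hv : s.toList.getD i '0' = '0' := not_ne_iff.mp hc
      have hsome : PySem.Str.pyGet? s (i : Int) = some '0' := by
        rw [PySem.Str.pyGet?_natCast, ← hv, List.getD_eq_getElem _ _ hlt]
        exact List.getElem?_eq_getElem hlt
      simp only [innerA, hsome, colSpec, if_neg hc]
      rw [if_neg (by decide : ¬(('0' : Char) ≠ '0'))]
      exact ih hrest

theorem mk_append (xs ys : List Char) : String.ofList (xs ++ ys) = String.ofList xs ++ String.ofList ys := by
  simp

theorem A_foldl (strings : List String) (m : Nat)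
    (h : ∀ i < m, ColOkP strings i) :
    ((List.range m).map (fun (k : Nat) => ((0 : Int) + (k : Int)))).foldl
        (fun result i => result ++ innerA i strings) ""
      = String.ofList ((List.range m).map (colSpec strings)) := by
  induction m with
  | zero => rfl
  | succ m ih =>
    rw [List.range_succ, List.map_append, List.foldl_append, List.map_append,
      ih (fun i hi => h i (by omega)), mk_append]
    simp only [List.map_cons, List.map_nil, List.foldl_cons, List.foldl_nil]
    rw [Int.zero_add, innerA_spec strings m (h m (by omega))]

theorem A_eq (strings : List String) (n : Int)
    (h : ∀ i < n.toNat, ColOkP strings i) :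
    replace_zeros strings n = String.ofList ((List.range n.toNat).map (colSpec strings)) := by
  unfold replace_zeros
  rw [PySem.List.pyRange_one]
  simpa using A_foldl strings n.toNat h

-- the result buffer after Source B's inner loop, column by column
def rowRes (s : List Char) : List Nat → List Char → List Char
  | [], res => res
  | i :: u, res =>
    rowRes s u (if s.getD i '0' ≠ '0' then res.set i (s.getD i '0') else res)

theorem rowStepB_eq (s : List Char) (u : List Nat) :
    ∀ (res : List Char) (acc : List Nat),
    u.foldl
      (fun (p : List Char × List Nat) i =>
        let c := s.getD i '0'
        if c ≠ '0' then (p.1.set i c, p.2) else (p.1, p.2 ++ [i]))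
      (res, acc)
      = (rowRes s u res, acc ++ u.filter (fun i => s.getD i '0' = '0')) := by
  induction u with
  | nil => intro res acc; simp [rowRes]
  | cons i u ih =>
    intro res acc
    simp only [List.foldl_cons]
    by_cases hc : s.getD i '0' ≠ '0'
    · rw [if_pos hc, ih]
      simp only [rowRes, if_pos hc]
      simp [List.filter_cons]
      rw [← List.getD_eq_getElem?_getD]
      exact hc
    · rw [if_neg hc, ih]
      simp only [rowRes, if_neg hc]
      simp [List.filter_cons]
      rw [← List.getD_eq_getElem?_getD]
      exact not_ne_iff.mp hc

theorem rowRes_length (s : List Char) (u : List Nat) :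
    ∀ res : List Char, (rowRes s u res).length = res.length := by
  induction u with
  | nil => intro res; rfl
  | cons i u ih => intro res; simp only [rowRes]; rw [ih]; split <;> simp

theorem rowRes_getD (s : List Char) (u : List Nat) :
    ∀ (res : List Char), (∀ i ∈ u, i < res.length) → ∀ j,
      (rowRes s u res).getD j '!' =
        if j ∈ u ∧ s.getD j '0' ≠ '0' then s.getD j '0' else res.getD j '!' := by
  induction u with
  | nil => intro res _ j; simp [rowRes]
  | cons i u ih =>
    intro res hu j
    by_cases hc : s.getD i '0' ≠ '0'
    · simp only [rowRes, if_pos hc]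
      rw [ih _ (fun x hx => by rw [List.length_set]; exact hu x (List.mem_cons_of_mem _ hx))]
      by_cases hju : j ∈ u ∧ s.getD j '0' ≠ '0'
      · rw [if_pos hju, if_pos ⟨List.mem_cons_of_mem _ hju.1, hju.2⟩]
      · rw [if_neg hju]
        by_cases hji : j = i
        · subst hji
          have hjl : j < res.length := hu j (by simp)
          rw [if_pos ⟨by simp, hc⟩, List.getD_eq_getElem _ _ (by simpa using hjl)]
          simp
        · rw [List.getD_eq_getElem?_getD, List.getElem?_set_ne (fun hh => hji hh.symm),
            ← List.getD_eq_getElem?_getD,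
            if_neg (fun hh => (List.mem_cons.mp hh.1).elim (fun h1 => hji h1)
              (fun h1 => hju ⟨h1, hh.2⟩))]
    · have hv : s.getD i '0' = '0' := not_ne_iff.mp hc
      simp only [rowRes, if_neg hc]
      rw [ih _ (fun x hx => hu x (List.mem_cons_of_mem _ hx))]
      by_cases hju : j ∈ u ∧ s.getD j '0' ≠ '0'
      · rw [if_pos hju, if_pos ⟨List.mem_cons_of_mem _ hju.1, hju.2⟩]
      · rw [if_neg hju,
          if_neg (fun hh => (List.mem_cons.mp hh.1).elim
            (fun h1 => hh.2 (h1 ▸ hv)) (fun h1 => hju ⟨h1, hh.2⟩))]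

theorem loopB_length (ss : List String) :
    ∀ (res : List Char) (u : List Nat), (∀ i ∈ u, i < res.length) →
      (loopB ss (res, u)).length = res.length := by
  induction ss with
  | nil => intro res u _; rfl
  | cons s rest ih =>
    intro res u hu
    by_cases he : u.isEmpty
    · simp [loopB, he]
    · simp only [loopB, if_neg he, rowStepB]
      rw [rowStepB_eq]
      rw [ih _ _ (fun i hi => by
        rw [rowRes_length]
        exact hu i (List.mem_filter.mp hi).1)]
      exact rowRes_length _ _ _

theorem loopB_getD (ss : List String) :
    ∀ (res : List Char) (u : List Nat),
      (∀ i ∈ u, i < res.length) → (∀ i ∈ u, res.getD i '!' = '0') → ∀ j,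
      (loopB ss (res, u)).getD j '!' =
        if j ∈ u then colSpec ss j else res.getD j '!' := by
  induction ss with
  | nil =>
    intro res u _ h0 j
    by_cases hj : j ∈ u
    · simp only [loopB, if_pos hj, colSpec]
      exact h0 j hj
    · simp only [loopB, if_neg hj]
  | cons s rest ih =>
    intro res u hu h0 j
    by_cases he : u.isEmpty
    · have : u = [] := List.isEmpty_iff.mp he
      subst this
      simp [loopB]
    · simp only [loopB, if_neg he, rowStepB]
      rw [rowStepB_eq]
      simp only [List.nil_append]
      have hu' : ∀ i ∈ u.filter (fun i => s.toList.getD i '0' = '0'),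
          i < (rowRes s.toList u res).length := fun i hi => by
        rw [rowRes_length]; exact hu i (List.mem_of_mem_filter hi)
      have h0' : ∀ i ∈ u.filter (fun i => s.toList.getD i '0' = '0'),
          (rowRes s.toList u res).getD i '!' = '0' := by
        intro i hi
        have hiu := List.mem_of_mem_filter hi
        have hic : s.toList.getD i '0' = '0' := of_decide_eq_true (List.mem_filter.mp hi).2
        rw [rowRes_getD s.toList u res hu i, if_neg (fun hh => hh.2 hic)]
        exact h0 i hiu
      rw [ih _ _ hu' h0' j]
      by_cases hj : j ∈ u
      · by_cases hc : s.toList.getD j '0' ≠ '0'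
        · have hjnf : j ∉ u.filter (fun i => s.toList.getD i '0' = '0') :=
            fun hf => hc (of_decide_eq_true (List.mem_filter.mp hf).2)
          rw [if_neg hjnf, rowRes_getD s.toList u res hu j, if_pos ⟨hj, hc⟩, if_pos hj]
          simp only [colSpec, if_pos hc]
        · have hv : s.toList.getD j '0' = '0' := not_ne_iff.mp hc
          have hjf : j ∈ u.filter (fun i => s.toList.getD i '0' = '0') :=
            List.mem_filter.mpr ⟨hj, decide_eq_true hv⟩
          rw [if_pos hjf, if_pos hj]
          simp only [colSpec, if_neg hc]
      · have hjnf : j ∉ u.filter (fun i => s.toList.getD i '0' = '0') :=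
            fun hf => hj (List.mem_filter.mp hf).1
        rw [if_neg hjnf, if_neg hj,
          rowRes_getD s.toList u res hu j, if_neg (fun hh => hj hh.1)]

theorem B_eq (strings : List String) (n : Int) :
    replace_zeros_alt strings n = String.ofList ((List.range n.toNat).map (colSpec strings)) := by
  unfold replace_zeros_alt
  congr 1
  set m := n.toNat
  have hu : ∀ i ∈ List.range m, i < (List.replicate m '0').length := by
    intro i hi; simpa using List.mem_range.mp hi
  have h0 : ∀ i ∈ List.range m, (List.replicate m '0').getD i '!' = '0' := by
    intro i hi
    rw [List.getD_eq_getElem _ _ (by simpa using List.mem_range.mp hi)]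
    simp
  apply List.ext_getElem
  · rw [loopB_length strings _ _ hu]; simp
  · intro j h1 h2
    have hj : j < m := by rw [loopB_length strings _ _ hu] at h1; simpa using h1
    rw [← List.getD_eq_getElem _ '!' h1, ← List.getD_eq_getElem _ '!' h2,
      loopB_getD strings _ _ hu h0 j, if_pos (List.mem_range.mpr hj)]
    rw [List.getD_eq_getElem _ _ h2]
    simp

-- ===== VERDICT (by name: the statement is the Claim_ definition above) =====
theorem replace_zeros_spec : Claim_equal_replace_zeros := by
  intro strings n _ hpre
  unfold Spec_replace_zeros
  have hall : ∀ i < n.toNat, ColOkP strings i := by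
    intro i hi
    apply pre_colOkP
    intro j hj hshort
    cases strings with
    | nil => simp at hj
    | cons s rest =>
      have hM : n.toNat ≤ s.toList.length := by
        by_contra hlt
        obtain ⟨k, hk, _⟩ := hpre s.toList.length
          (by simp only [List.getD_cons_zero]; omega) 0 (by simp)
          (by simp only [List.getD_cons_zero]; omega)
        omega
      exact hpre i (by simp only [List.getD_cons_zero]; omega) j hj hshort
  rw [B_eq, A_eq strings n hall]
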